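-- pv_equiv track=rewrite | github.com/mkeeble1984/Udemy-Python-Bootcamp | Udemy Python Bootcamp/Student_Scores.py | convert_grade
-- ===== SOURCE A (Python) =====
-- def convert_grade(p_student_scores):
--     for key in p_student_scores:
--         if p_student_scores[key] >= 85:
--             p_student_scores[key] = "Outstanding"
--         elif p_student_scores[key] >= 65:
--             p_student_scores[key] = "Good"
--         elif p_student_scores[key] >= 50:
--             p_student_scores[key] = "Acceptable"
--         else:
--             p_student_scores[key] = "Fail"
--
--     return p_student_scores
-- ===== SOURCE B (Python) =====
-- def convert_grade(p_student_scores):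
--     # Staged promotion: snapshot the numeric scores, set everyone to "Fail",
--     # then make one sweep per grade band, promoting every student whose score
--     # reaches that band's cutoff.  Same dict mutated in place and returned.
--     scores = dict(p_student_scores)
--     for key in scores:
--         p_student_scores[key] = "Fail"
--     for cutoff, label in ((50, "Acceptable"), (65, "Good"), (85, "Outstanding")):
--         for key, score in scores.items():
--             if score >= cutoff:
--                 p_student_scores[key] = label
--     return p_student_scores
-- ===== Notes on version B (the rewrite author's own statement) =====
-- stated objective: alternative
-- what changed: A decides each student's grade in one pass with a four-way if/elif chain; B instead snapshots the scores, initialises every entry to "Fail", and then makes one promotion sweep per grade band (>=50, >=65, >=85), each sweep overwriting the label of every student who reaches that cutoff.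
import Mathlib
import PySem

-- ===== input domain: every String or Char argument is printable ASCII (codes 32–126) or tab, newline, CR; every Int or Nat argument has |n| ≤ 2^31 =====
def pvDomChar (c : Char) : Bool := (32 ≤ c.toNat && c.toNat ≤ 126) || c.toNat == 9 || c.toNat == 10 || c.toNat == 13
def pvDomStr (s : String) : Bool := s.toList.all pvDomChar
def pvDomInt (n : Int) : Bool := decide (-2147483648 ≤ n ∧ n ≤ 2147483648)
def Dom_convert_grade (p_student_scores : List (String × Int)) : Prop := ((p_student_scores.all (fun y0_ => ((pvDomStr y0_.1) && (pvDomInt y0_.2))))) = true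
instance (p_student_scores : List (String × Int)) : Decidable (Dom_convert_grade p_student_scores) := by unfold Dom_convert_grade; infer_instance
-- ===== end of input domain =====

-- B replaces A's one-pass four-way if/elif chain by staged promotion: every entry
-- is set to "Fail", then one sweep per grade band promotes all students reaching
-- that cutoff (alternative decomposition, same O(n) cost); both Pythons mutate the
-- dict in place and return the same object.


-- ===== PORT A =====
-- Python dict assignment d[key] = v: overwrite the first matching entry in place,
-- otherwise append (the value type changes from Int to String during the loop, so
-- the mutated dict is modelled as a String-valued assoc list built alongside).
def pvDictAssign (d : List (String × String)) (k : String) (v : String) : List (String × String) :=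
  match d with
  | [] => [(k, v)]
  | (k', v') :: rest => if k' == k then (k', v) :: rest else (k', v') :: pvDictAssign rest k v

-- the body of A's loop: p_student_scores[key] is re-read (first match in the original
-- Int-valued dict, never yet overwritten) and the if/elif chain assigns the label
def pvStep (d : List (String × Int)) (acc : List (String × String)) (key : String) : List (String × String) :=
  if (d.lookup key).getD 0 ≥ 85 then pvDictAssign acc key "Outstanding"
  else if (d.lookup key).getD 0 ≥ 65 then pvDictAssign acc key "Good"
  else if (d.lookup key).getD 0 ≥ 50 then pvDictAssign acc key "Acceptable"
  else pvDictAssign acc key "Fail"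

-- 'for key in p_student_scores': iterate over the keys; p_student_scores[key] reads
-- the (not yet overwritten) Int value = first match in the original list.
def convert_grade (p_student_scores : List (String × Int)) : List (String × String) :=
  (p_student_scores.map Prod.fst).foldl (pvStep p_student_scores) []

-- ===== PORT B =====
-- one promotion sweep: every entry of the score snapshot reaching the cutoff gets its
-- label overwritten in the (String-valued) dict state
def pvPass (scores : List (String × Int)) (acc : List (String × String))
    (cutoff : Int) (label : String) : List (String × String) :=
  scores.foldl (fun a kv => if kv.2 ≥ cutoff then pvDictAssign a kv.1 label else a) acc

-- B: snapshot the scores, set every key to "Fail", then one sweep per grade band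
def convert_grade_alt (p_student_scores : List (String × Int)) : List (String × String) :=
  let scores := p_student_scores
  let init := (scores.map Prod.fst).foldl (fun a k => pvDictAssign a k "Fail") []
  [((50 : Int), "Acceptable"), (65, "Good"), (85, "Outstanding")].foldl
    (fun a cl => pvPass scores a cl.1 cl.2) init

-- ===== PRECONDITION & SPEC =====
-- Pre_ requires pairwise-distinct keys: a Python dict cannot hold duplicate keys, so
-- an association list with a repeated key encodes no input the Python function ever sees.
def Pre_convert_grade (p_student_scores : List (String × Int)) : Prop :=
  (p_student_scores.map Prod.fst).Nodup
instance (p_student_scores : List (String × Int)) : Decidable (Pre_convert_grade p_student_scores) := by unfold Pre_convert_grade; infer_instance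

def pvWitness_convert_grade : (List (String × Int)) := [("ann", 92), ("bob", 50), ("cid", 49)]

def Spec_convert_grade (p_student_scores : List (String × Int)) (out : List (String × String)) : Prop := out = convert_grade_alt p_student_scores
instance (p_student_scores : List (String × Int)) (out : List (String × String)) : Decidable (Spec_convert_grade p_student_scores out) := by unfold Spec_convert_grade; infer_instance

-- ===== CLAIM (what is proved, stated in full; the proofs are below) =====
def Claim_equal_convert_grade : Prop := ∀ (p_student_scores : List (String × Int)), Dom_convert_grade p_student_scores → Pre_convert_grade p_student_scores → Spec_convert_grade p_student_scores (convert_grade p_student_scores)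

-- ===== LEMMAS AND PROOFS =====

-- assigning a fresh key appends
theorem pv_assign_fresh (acc : List (String × String)) (k : String) (v : String)
    (h : ∀ p ∈ acc, p.1 ≠ k) : pvDictAssign acc k v = acc ++ [(k, v)] := by
  induction acc with
  | nil => rfl
  | cons p rest ih =>
    have hp : p.1 ≠ k := h p (by simp)
    cases p with
    | mk k' v' =>
      simp only [pvDictAssign]
      rw [if_neg (by simpa using hp)]
      simp [ih (fun q hq => h q (by simp [hq]))]

-- assigning a key absent from a prefix passes over it
theorem pv_assign_append (pre xs : List (String × String)) (k : String) (v : String)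
    (h : ∀ p ∈ pre, p.1 ≠ k) :
    pvDictAssign (pre ++ xs) k v = pre ++ pvDictAssign xs k v := by
  induction pre with
  | nil => rfl
  | cons p rest ih =>
    cases p with
    | mk k' v' =>
      simp only [List.cons_append, pvDictAssign]
      rw [if_neg (by simpa using h (k', v') (by simp))]
      simp [ih (fun q hq => h q (by simp [hq]))]

-- with nodup keys, the first match of each entry's key is its own value
theorem pv_lookup_self (D : List (String × Int)) (hnd : (D.map Prod.fst).Nodup) :
    ∀ kv ∈ D, D.lookup kv.1 = some kv.2 := by
  induction D with
  | nil => intro kv h; cases h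
  | cons p rest ih =>
    intro kv hkv
    simp only [List.map, List.nodup_cons] at hnd
    rcases List.mem_cons.mp hkv with h | h
    · subst h; simp [List.lookup]
    · have hne : p.1 ≠ kv.1 := by
        intro he; exact hnd.1 (he ▸ (List.mem_map.mpr ⟨kv, h, rfl⟩))
      have hb : (kv.1 == p.1) = false := beq_eq_false_iff_ne.mpr (Ne.symm hne)
      simp only [List.lookup, hb]
      exact ih hnd.2 kv h

-- the fold of A over a suffix l of keys, appending to an accumulator whose keys avoid l
theorem pv_fold_eq (D : List (String × Int)) :
    ∀ (l : List (String × Int)) (acc : List (String × String)),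
      (l.map Prod.fst).Nodup →
      (∀ kv ∈ l, D.lookup kv.1 = some kv.2) →
      (∀ p ∈ acc, ∀ kv ∈ l, p.1 ≠ kv.1) →
      (l.map Prod.fst).foldl (pvStep D) acc
      = acc ++ l.map (fun kv =>
          (kv.1, if kv.2 ≥ 85 then "Outstanding" else if kv.2 ≥ 65 then "Good"
                 else if kv.2 ≥ 50 then "Acceptable" else "Fail")) := by
  intro l
  induction l with
  | nil => intro acc _ _ _; simp
  | cons kv rest ih =>
    intro acc hnd hlook hacc
    simp only [List.map, List.nodup_cons] at hnd
    have hv : (D.lookup kv.1).getD 0 = kv.2 := by rw [hlook kv (by simp)]; rfl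
    have hfresh : ∀ p ∈ acc, p.1 ≠ kv.1 := fun p hp => hacc p hp kv (by simp)
    have hstep : pvStep D acc kv.1
        = acc ++ [(kv.1, if kv.2 ≥ 85 then "Outstanding" else if kv.2 ≥ 65 then "Good"
                  else if kv.2 ≥ 50 then "Acceptable" else "Fail")] := by
      simp only [pvStep, hv]
      split_ifs <;> exact pv_assign_fresh acc kv.1 _ hfresh
    simp only [List.map_cons, List.foldl_cons, hstep]
    rw [ih (acc ++ [_]) hnd.2 (fun q hq => hlook q (by simp [hq]))]
    · simp
    · intro p hp q hq
      rcases List.mem_append.mp hp with h | h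
      · exact hacc p h q (by simp [hq])
      · rw [List.mem_singleton.mp h]
        intro he
        exact hnd.1 (he ▸ List.mem_map.mpr ⟨q, hq, rfl⟩)

-- B's initial sweep builds the all-"Fail" labelling
theorem pv_init_eq (D : List (String × Int)) :
    ∀ (l : List (String × Int)) (acc : List (String × String)),
      (l.map Prod.fst).Nodup →
      (∀ p ∈ acc, ∀ kv ∈ l, p.1 ≠ kv.1) →
      (l.map Prod.fst).foldl (fun a k => pvDictAssign a k "Fail") acc
      = acc ++ l.map (fun kv => (kv.1, "Fail")) := by
  intro l
  induction l with
  | nil => intro acc _ _; simp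
  | cons kv rest ih =>
    intro acc hnd hacc
    simp only [List.map, List.nodup_cons] at hnd
    have hfresh : ∀ p ∈ acc, p.1 ≠ kv.1 := fun p hp => hacc p hp kv (by simp)
    simp only [List.map_cons, List.foldl_cons, pv_assign_fresh acc kv.1 "Fail" hfresh]
    rw [ih (acc ++ [_]) hnd.2]
    · simp
    · intro p hp q hq
      rcases List.mem_append.mp hp with h | h
      · exact hacc p h q (by simp [hq])
      · rw [List.mem_singleton.mp h]
        intro he
        exact hnd.1 (he ▸ List.mem_map.mpr ⟨q, hq, rfl⟩)

-- one promotion sweep over a labelled state with nodup keys updates pointwise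
theorem pv_pass_eq (c : Int) (lab : String) :
    ∀ (l : List (String × Int)) (pre : List (String × String)) (f : Int → String),
      (l.map Prod.fst).Nodup →
      (∀ p ∈ pre, ∀ kv ∈ l, p.1 ≠ kv.1) →
      pvPass l (pre ++ l.map (fun kv => (kv.1, f kv.2))) c lab
      = pre ++ l.map (fun kv => (kv.1, if kv.2 ≥ c then lab else f kv.2)) := by
  intro l
  induction l with
  | nil => intro pre f _ _; simp [pvPass]
  | cons kv rest ih =>
    intro pre f hnd hpre
    simp only [List.map, List.nodup_cons] at hnd
    have hprek : ∀ p ∈ pre, p.1 ≠ kv.1 := fun p hp => hpre p hp kv (by simp)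
    have hstep : (if kv.2 ≥ c then
          pvDictAssign (pre ++ (kv.1, f kv.2) :: rest.map (fun kv => (kv.1, f kv.2))) kv.1 lab
        else pre ++ (kv.1, f kv.2) :: rest.map (fun kv => (kv.1, f kv.2)))
        = pre ++ (kv.1, if kv.2 ≥ c then lab else f kv.2) :: rest.map (fun kv => (kv.1, f kv.2)) := by
      split_ifs with h
      · rw [pv_assign_append pre _ kv.1 lab hprek]
        simp [pvDictAssign]
      · rfl
    have hpre' : ∀ p ∈ pre ++ [(kv.1, if kv.2 ≥ c then lab else f kv.2)],
        ∀ q ∈ rest, p.1 ≠ q.1 := by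
      intro p hp q hq
      rcases List.mem_append.mp hp with h | h
      · exact hpre p h q (by simp [hq])
      · rw [List.mem_singleton.mp h]
        intro he
        exact hnd.1 (he ▸ List.mem_map.mpr ⟨q, hq, rfl⟩)
    simp only [pvPass, List.foldl_cons, List.map_cons] at *
    rw [hstep]
    simpa using ih (pre ++ [(kv.1, if kv.2 ≥ c then lab else f kv.2)]) f hnd.2 hpre'

-- ===== VERDICT (by name: the statement is the Claim_ definition above) =====
theorem convert_grade_spec : Claim_equal_convert_grade := by
  intro D _ hpre
  unfold Spec_convert_grade convert_grade convert_grade_alt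
  rw [pv_fold_eq D D [] hpre (pv_lookup_self D hpre) (by simp)]
  simp only [List.foldl_cons, List.foldl_nil, List.nil_append]
  rw [pv_init_eq D D [] hpre (by simp)]
  simp only [List.nil_append]
  have h1 := pv_pass_eq 50 "Acceptable" D [] (fun _ => "Fail") hpre (by simp)
  have h2 := pv_pass_eq 65 "Good" D [] (fun v => if v ≥ 50 then "Acceptable" else "Fail") hpre (by simp)
  have h3 := pv_pass_eq 85 "Outstanding" D []
      (fun v => if v ≥ 65 then "Good" else if v ≥ 50 then "Acceptable" else "Fail") hpre (by simp)
  simp only [List.nil_append] at h1 h2 h3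
  rw [h1, h2, h3]
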